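-- pv_equiv track=rewrite | github.com/pypi-data/pypi-mirror-282 | packages/ws2812-gpt-lp/ws2812_gpt_lp-0.1.5.tar.gz/ws2812_gpt_lp-0.1.5/src/ws2812_gpt_lp/ws2812gptlp.py | encode_byte
-- ===== SOURCE A (Python) =====
-- def encode_byte(byte):
--     """Encode un octet en séquence de bits pour WS2812 via SPI."""
--     encoded = []
--     for i in range(8):
--         if byte & (1 << (7 - i)):
--             encoded.append(0b11100000)  # Bit 1
--         else:
--             encoded.append(0b10000000)  # Bit 0
--     return encoded
-- ===== SOURCE B (Python) =====
-- _TABLE = [tuple(0b11100000 if (n >> (7 - i)) & 1 else 0b10000000 for i in range(8))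
--           for n in range(256)]
--
--
-- def encode_byte(byte):
--     """Encode un octet en séquence de bits pour WS2812 via SPI."""
--     return list(_TABLE[byte & 0xFF])
-- ===== Notes on version B (the rewrite author's own statement) =====
-- stated objective: alternative
-- what changed: A's per-call loop over the eight bits is replaced by a single indexed lookup into a module-level table holding the precomputed pattern tuple for every possible byte value, indexed by the low eight bits of the argument.
import Mathlib
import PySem

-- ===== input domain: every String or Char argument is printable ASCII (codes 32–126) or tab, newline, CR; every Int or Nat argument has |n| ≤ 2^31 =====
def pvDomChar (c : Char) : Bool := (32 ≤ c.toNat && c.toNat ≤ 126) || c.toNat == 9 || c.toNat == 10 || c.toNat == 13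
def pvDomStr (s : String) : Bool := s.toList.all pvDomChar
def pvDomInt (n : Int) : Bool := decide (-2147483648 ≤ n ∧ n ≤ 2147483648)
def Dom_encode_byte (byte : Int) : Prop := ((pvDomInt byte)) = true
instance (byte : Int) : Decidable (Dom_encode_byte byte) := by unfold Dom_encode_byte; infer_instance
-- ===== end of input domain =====

-- B replaces A's per-bit loop by a single lookup into a module-level table that precomputes
-- the pattern for every possible byte value (objective: alternative data structure).


-- ===== PORT A =====
-- A: loop i = 0..7, test bit (7-i) of byte (Python `byte & (1 << (7-i))`; the shift
-- amount 7-i is a nonneg literal here, so `.toNat` is exact), append 0b11100000 / 0b10000000.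
def encode_byte (byte : Int) : List Int :=
  (PySem.List.pyRange 0 8 1).foldl (fun encoded i =>
    if PySem.Int.band byte ((1 : Int) <<< (7 - i).toNat) ≠ 0 then
      encoded ++ [0b11100000]
    else
      encoded ++ [0b10000000]) []

-- ===== PORT B =====
-- B's module-level table: entry n (0 ≤ n < 256) is the 8-bit pattern for byte n.
def pvTable : List (List Int) :=
  (PySem.List.pyRange 0 256 1).map (fun n =>
    (PySem.List.pyRange 0 8 1).map (fun i =>
      if PySem.Int.band (n >>> (7 - i).toNat) 1 ≠ 0 then (0b11100000 : Int) else 0b10000000))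

-- B: `list(_TABLE[byte & 0xFF])` — the masked index is always in range, so getD's
-- default is never reached.
def encode_byte_alt (byte : Int) : List Int :=
  (PySem.List.pyGet? pvTable (PySem.Int.band byte 255)).getD []

-- ===== PRECONDITION & SPEC =====
def Spec_encode_byte (byte : Int) (out : List Int) : Prop := out = encode_byte_alt byte
instance (byte : Int) (out : List Int) : Decidable (Spec_encode_byte byte out) := by unfold Spec_encode_byte; infer_instance

-- ===== CLAIM (what is proved, stated in full; the proofs are below) =====
def Claim_equal_encode_byte : Prop := ∀ (byte : Int), Dom_encode_byte byte → Spec_encode_byte byte (encode_byte byte)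

-- ===== LEMMAS AND PROOFS =====

-- 2^k - (2^k &&& x) = (255 - x) &&& 2^k on the bounded range (used for negative bytes).
set_option maxRecDepth 8192 in
theorem pv_nat_compl_bit : ∀ (x : Fin 256) (k : Fin 8),
    2 ^ k.val - (2 ^ k.val &&& x.val) = (255 - x.val) &&& 2 ^ k.val := by decide

theorem pv_fmod_eq_emod (a : Int) : PySem.Int.mod a 256 = a % 256 := by
  show a.fmod 256 = a % 256
  rw [Int.fmod_eq_emod]; simp

-- Python `b & 255` is `b % 256`.
theorem pv_band_255 (b : Int) : PySem.Int.band b 255 = PySem.Int.mod b 256 := by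
  rw [pv_fmod_eq_emod]
  unfold PySem.Int.band
  have h1 : (255 : Int).toNat = 2 ^ 8 - 1 := by decide
  by_cases hb : (0:Int) ≤ b
  · rw [if_pos hb, if_pos (show (0:Int) ≤ 255 by norm_num), h1,
      Nat.and_two_pow_sub_one_eq_mod]
    omega
  · rw [if_neg hb, if_pos (show (0:Int) ≤ 255 by norm_num), h1,
      Nat.and_comm, Nat.and_two_pow_sub_one_eq_mod]
    omega

-- b's k-th bit (k < 8) agrees with (b % 256)'s k-th bit.
theorem pv_band_pow (b : Int) (k : Nat) (hk : k < 8) :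
    PySem.Int.band b (2 ^ k) = PySem.Int.band (PySem.Int.mod b 256) (2 ^ k) := by
  rw [pv_fmod_eq_emod]
  have hr0 : (0:Int) ≤ b % 256 := Int.emod_nonneg b (by norm_num)
  have hr1 : b % 256 < 256 := Int.emod_lt_of_pos b (by norm_num)
  have hpow : (0:Int) ≤ 2 ^ k := by positivity
  unfold PySem.Int.band
  by_cases hb : (0:Int) ≤ b
  · rw [if_pos hb, if_pos hpow, if_pos hr0, if_pos hpow]
    have hm : (b % 256).toNat = b.toNat % 256 := by omega
    have hp : ((2:Int) ^ k).toNat = 2 ^ k := by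
      rw [show ((2:Int)^k) = ((2^k : Nat) : Int) by push_cast; ring]; exact Int.toNat_natCast _
    rw [hm, hp, Nat.and_two_pow, Nat.and_two_pow,
      show (256 : Nat) = 2 ^ 8 by norm_num, Nat.testBit_mod_two_pow]
    simp [hk]
  · rw [if_neg hb, if_pos hpow, if_pos hr0, if_pos hpow]
    set m : Nat := (-b - 1).toNat with hmdef
    have hbm : b = -(m : Int) - 1 := by omega
    have hr : (b % 256).toNat = 255 - m % 256 := by omega
    have hp : ((2:Int) ^ k).toNat = 2 ^ k := by
      rw [show ((2:Int)^k) = ((2^k : Nat) : Int) by push_cast; ring]; exact Int.toNat_natCast _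
    rw [hr, hp, Nat.and_two_pow]
    have h1 : 2 ^ k &&& m = 2 ^ k &&& (m % 256) := by
      rw [Nat.two_pow_and, Nat.two_pow_and,
        show (256 : Nat) = 2 ^ 8 by norm_num, Nat.testBit_mod_two_pow]
      simp [hk]
    rw [h1, show 2 ^ k &&& (m % 256) = (2 ^ k &&& (m % 256) : Nat) from rfl]
    have := pv_nat_compl_bit ⟨m % 256, by omega⟩ ⟨k, hk⟩
    simp only at this
    rw [Nat.and_two_pow] at this
    omega

theorem pv_A_map (b : Int) : encode_byte b =
    (PySem.List.pyRange 0 8 1).map (fun i =>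
      if PySem.Int.band b ((1 : Int) <<< (((7 - i).toNat : Int))) ≠ 0 then (0b11100000 : Int) else 0b10000000) := by
  rw [encode_byte]
  have h : (fun (encoded : List Int) (i : Int) =>
      if PySem.Int.band b ((1 : Int) <<< (((7 - i).toNat : Int))) ≠ 0 then encoded ++ [(0b11100000 : Int)]
      else encoded ++ [0b10000000]) =
      (fun (encoded : List Int) (i : Int) => encoded ++
        [if PySem.Int.band b ((1 : Int) <<< (((7 - i).toNat : Int))) ≠ 0 then (0b11100000 : Int) else 0b10000000]) := by
    funext encoded i; split <;> rfl
  rw [h, PySem.List.foldl_append_singleton_eq_map, List.nil_append]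

theorem pv_A_mod (b : Int) : encode_byte b = encode_byte (PySem.Int.mod b 256) := by
  rw [pv_A_map, pv_A_map]
  apply List.map_congr_left
  intro i hi
  have hmem := (PySem.List.mem_pyRange_one (a := 0) (b := 8) (x := i)).mp hi
  have hk : (7 - i).toNat < 8 := by omega
  rw [show ((1 : Int) <<< (((7 - i).toNat : Int))) = 2 ^ (7 - i).toNat by
      rw [show ((1:Int)) = (((1:Nat)):Int) from rfl, Int.shiftLeft_natCast,
        Nat.one_shiftLeft]; push_cast; ring]
  rw [pv_band_pow b _ hk]

set_option maxRecDepth 100000 in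
set_option maxHeartbeats 1000000 in
theorem pv_small : ∀ (r : Fin 256),
    encode_byte (r.val : Int) = encode_byte_alt (r.val : Int) := by decide

theorem pv_mod_mod (b : Int) :
    PySem.Int.band (PySem.Int.mod b 256) 255 = PySem.Int.mod b 256 := by
  rw [pv_band_255, pv_fmod_eq_emod, pv_fmod_eq_emod, Int.emod_emod_of_dvd _ (by norm_num)]

-- ===== VERDICT (by name: the statement is the Claim_ definition above) =====
theorem encode_byte_spec : Claim_equal_encode_byte := by
  intro byte _
  show encode_byte byte = encode_byte_alt byte
  have hr0 : (0:Int) ≤ byte % 256 := Int.emod_nonneg byte (by norm_num)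
  have hr1 : byte % 256 < 256 := Int.emod_lt_of_pos byte (by norm_num)
  have hmod : PySem.Int.mod byte 256 = byte % 256 := pv_fmod_eq_emod byte
  have hsm := pv_small ⟨(byte % 256).toNat, by omega⟩
  have hcast : (((byte % 256).toNat : Nat) : Int) = byte % 256 := by omega
  rw [pv_A_mod byte, hmod]
  have halt : encode_byte_alt byte = encode_byte_alt (byte % 256) := by
    unfold encode_byte_alt
    rw [pv_band_255, hmod, ← hmod, pv_mod_mod, hmod]
  rw [halt, ← hcast, hsm]
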